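-- pv_equiv track=rewrite | github.com/AlexanderDLe/Python_DataStructuresAndAlgorithms | Amazon/PlatesBetweenCandles.py | buildNearestRightCandle
-- ===== SOURCE A (Python) =====
-- def buildNearestRightCandle(s, n):
--   right = [n + 1] * n
--   count = n + 1
--
--   for i in range(n - 1, -1, -1):
--     if s[i] == '|':
--       count = i
--       right[i] = count
--     else:
--       right[i] = count
--
--   return right
-- ===== SOURCE B (Python) =====
-- def buildNearestRightCandle(s, n):
--   candles = [i for i in range(n) if s[i] == '|']
--   out = []
--   prev = 0
--   for c in candles:
--     out += [c] * (c + 1 - prev)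
--     prev = c + 1
--   out += [n + 1] * (n - prev)
--   return out
-- ===== Notes on version B (the rewrite author's own statement) =====
-- stated objective: alternative
-- what changed: Instead of a backward pass mutating a preallocated array with a running nearest-candle value, B first collects the candle positions and then constructs the output by pure concatenation of constant segments (one block per candle, plus an n+1 sentinel tail), with no index assignment at all.
import Mathlib
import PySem

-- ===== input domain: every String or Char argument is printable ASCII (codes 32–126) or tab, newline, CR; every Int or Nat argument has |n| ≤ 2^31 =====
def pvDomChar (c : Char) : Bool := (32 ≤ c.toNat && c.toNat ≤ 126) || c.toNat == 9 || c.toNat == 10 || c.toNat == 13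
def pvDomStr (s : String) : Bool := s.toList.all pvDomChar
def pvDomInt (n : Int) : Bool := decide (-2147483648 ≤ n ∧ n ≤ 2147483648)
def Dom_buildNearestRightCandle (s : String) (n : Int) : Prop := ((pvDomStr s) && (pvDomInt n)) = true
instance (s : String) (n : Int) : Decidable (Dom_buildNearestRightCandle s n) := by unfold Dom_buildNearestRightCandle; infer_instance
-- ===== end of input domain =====

-- B replaces A's backward index-assignment pass by collecting the candle positions and concatenating constant segments (alternative decomposition, same cost).

-- ===== PORT A =====
-- backward loop over range(n-1, -1, -1) carrying (right, count); s[i] out of range = IndexError (excluded by Pre_), the port keeps the state there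
def buildNearestRightCandle (s : String) (n : Int) : List Int :=
  (((PySem.List.pyRange (n - 1) (-1) (-1)).foldl
    (fun (st : List Int × Int) i =>
      match PySem.List.pyGet? s.toList i with
      | some c => if c = '|' then (PySem.List.pySetD st.1 i i, i) else (PySem.List.pySetD st.1 i st.2, st.2)
      | none => st)
    (List.replicate n.toNat (n + 1), n + 1))).1

-- ===== PORT B =====
-- candle positions = [i for i in range(n) if s[i] == '|'], then one replicate-block per candle
-- carrying (out, prev), closed by the sentinel tail [n+1] * (n - prev); s[i] in the comprehension
-- is pyGet? (none = IndexError, excluded by Pre_)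
def buildNearestRightCandle_alt (s : String) (n : Int) : List Int :=
  let candles := (PySem.List.pyRange 0 n 1).filter
    (fun i => PySem.List.pyGet? s.toList i == some '|')
  let st := candles.foldl
    (fun (st : List Int × Int) c => (st.1 ++ List.replicate (c + 1 - st.2).toNat c, c + 1))
    ([], 0)
  st.1 ++ List.replicate (n - st.2).toNat (n + 1)

-- ===== PRECONDITION & SPEC =====
-- Pre_ excludes exactly the inputs where Python A raises IndexError (n larger than the length of s); B raises there too.
def Pre_buildNearestRightCandle (s : String) (n : Int) : Prop := n ≤ (s.toList.length : Int)
instance (s : String) (n : Int) : Decidable (Pre_buildNearestRightCandle s n) := by unfold Pre_buildNearestRightCandle; infer_instance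
def pvWitness_buildNearestRightCandle : String × Int := ("*|*a|", 5)

def Spec_buildNearestRightCandle (s : String) (n : Int) (out : List Int) : Prop := out = buildNearestRightCandle_alt s n
instance (s : String) (n : Int) (out : List Int) : Decidable (Spec_buildNearestRightCandle s n out) := by unfold Spec_buildNearestRightCandle; infer_instance

-- ===== CLAIM (what is proved, stated in full; the proofs are below) =====
def Claim_equal_buildNearestRightCandle : Prop := ∀ (s : String) (n : Int), Dom_buildNearestRightCandle s n → Pre_buildNearestRightCandle s n → Spec_buildNearestRightCandle s n (buildNearestRightCandle s n)

-- ===== LEMMAS AND PROOFS =====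

-- reference function: value at position i is i if candle, else head of the suffix result (base if none)
def pvK (base : Int) : List Char → Int → List Int
  | [], _ => []
  | c :: cs, i =>
    let r := pvK base cs (i + 1)
    (if c = '|' then i else r.headD base) :: r

theorem pvK_length (b : Int) (cs : List Char) (i : Int) : (pvK b cs i).length = cs.length := by
  induction cs generalizing i with
  | nil => rfl
  | cons c cs ih => simp [pvK, ih]

theorem headD_replicate (k : Nat) (b : Int) : (List.replicate k b).headD b = b := by
  cases k <;> rfl

theorem pvK_no_candle (b : Int) (cs : List Char) (i : Int) (h : '|' ∉ cs) :
    pvK b cs i = List.replicate cs.length b := by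
  induction cs generalizing i with
  | nil => rfl
  | cons c cs ih =>
    simp only [List.mem_cons, not_or] at h
    rw [show pvK b (c :: cs) i = (if c = '|' then i else (pvK b cs (i + 1)).headD b) :: pvK b cs (i + 1) from rfl]
    rw [ih (i + 1) h.2, List.length_cons, List.replicate_succ]
    congr 1
    rw [if_neg (Ne.symm h.1)]
    exact headD_replicate _ _

theorem pvK_append (b : Int) (u w : List Char) (i : Int) :
    pvK b (u ++ w) i = pvK ((pvK b w (i + u.length)).headD b) u i ++ pvK b w (i + u.length) := by
  induction u generalizing i with
  | nil => simp [pvK]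
  | cons c u ih =>
    simp only [List.cons_append, pvK, ih (i + 1)]
    have hlen : i + 1 + (u.length : Int) = i + (c :: u).length := by simp; ring
    rw [hlen]
    congr 1
    split
    · rfl
    · rcases hu : pvK ((pvK b w (i + (c :: u).length)).headD b) u (i + 1) with _ | ⟨x, xs⟩
      · have : u.length = 0 := by simpa [pvK_length] using congrArg List.length hu
        rcases List.length_eq_zero_iff.mp this with rfl
        simp [pvK] at hu ⊢
      · simp

theorem pvK_base_irrel (b b' : Int) (u : List Char) (i : Int) (h : u.getLast? = some '|') :
    pvK b u i = pvK b' u i := by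
  induction u generalizing i with
  | nil => simp at h
  | cons c u ih =>
    rcases u with _ | ⟨d, u⟩
    · simp at h
      simp [pvK, h]
    · have h' : (d :: u).getLast? = some '|' := by simpa using h
      have hT := ih (i + 1) h'
      rw [show pvK b (c :: d :: u) i = (if c = '|' then i else (pvK b (d :: u) (i + 1)).headD b) :: pvK b (d :: u) (i + 1) from rfl]
      rw [show pvK b' (c :: d :: u) i = (if c = '|' then i else (pvK b' (d :: u) (i + 1)).headD b') :: pvK b' (d :: u) (i + 1) from rfl]
      rw [hT]
      rcases hk : pvK b' (d :: u) (i + 1) with _ | ⟨x, xs⟩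
      · have := congrArg List.length hk
        simp [pvK_length] at this
      · simp

-- segment with no candle then a final candle: every position points at the final candle
theorem pvK_seg (b : Int) (m : List Char) (p : Int) (h : '|' ∉ m) :
    pvK b (m ++ ['|']) p = List.replicate (m.length + 1) (p + m.length) := by
  induction m generalizing p with
  | nil => simp [pvK]
  | cons c m ih =>
    simp only [List.mem_cons, not_or] at h
    have hT := ih (p + 1) h.2
    rw [List.cons_append]
    rw [show pvK b (c :: (m ++ ['|'])) p = (if c = '|' then p else (pvK b (m ++ ['|']) (p + 1)).headD b) :: pvK b (m ++ ['|']) (p + 1) from rfl]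
    rw [hT]
    have hl : (p + 1) + (m.length : Int) = p + (c :: m).length := by simp; ring
    rw [hl]
    rw [show ((c :: m).length : Nat) = m.length + 1 from rfl, List.replicate_succ]
    congr 1
    rw [if_neg (Ne.symm h.1)]
    rfl

theorem set_replicate_append {α : Type} (k : Nat) (x v : α) (L : List α) :
    (List.replicate (k + 1) x ++ L).set k v = List.replicate k x ++ v :: L := by
  induction k with
  | zero => rfl
  | succ k ih =>
    rw [show List.replicate (k + 1 + 1) x = x :: List.replicate (k + 1) x from rfl, List.cons_append,
      List.set_cons_succ, ih, show List.replicate (k + 1) x = x :: List.replicate k x from rfl,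
      List.cons_append]

-- A-side invariant: after the backward loop has handled indices ≥ k, the state is
-- (replicate k sentinel ++ pvK of the suffix, head of that suffix result)
theorem foldA_inv (s : String) (n : Int) (hn : 0 ≤ n) (hlen : n ≤ (s.toList.length : Int))
    (k : Nat) (hk : k ≤ n.toNat) :
    (PySem.List.pyRange ((k : Int) - 1) (-1) (-1)).foldl
      (fun (st : List Int × Int) i =>
        match PySem.List.pyGet? s.toList i with
        | some c => if c = '|' then (PySem.List.pySetD st.1 i i, i) else (PySem.List.pySetD st.1 i st.2, st.2)
        | none => st)
      (List.replicate k (n + 1) ++ pvK (n + 1) ((s.toList.take n.toNat).drop k) k,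
        (pvK (n + 1) ((s.toList.take n.toNat).drop k) k).headD (n + 1))
    = (pvK (n + 1) (s.toList.take n.toNat) 0,
        (pvK (n + 1) (s.toList.take n.toNat) 0).headD (n + 1)) := by
  induction k with
  | zero =>
    rw [show ((0 : Nat) : Int) - 1 = -1 by ring, PySem.List.pyRange_neg_one_eq_nil le_rfl]
    simp
  | succ k ih =>
    have htlen : (s.toList.take n.toNat).length = n.toNat := by
      rw [List.length_take]; omega
    have hk' : k < n.toNat := hk
    have hcons : PySem.List.pyRange (((k + 1 : Nat) : Int) - 1) (-1) (-1)
        = ((k : Nat) : Int) :: PySem.List.pyRange (((k : Nat) : Int) - 1) (-1) (-1) := by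
      rw [show (((k + 1 : Nat) : Int) - 1) = ((k : Nat) : Int) by push_cast; ring]
      exact PySem.List.pyRange_neg_one_cons (by omega)
    rw [hcons, List.foldl_cons]
    have hget : PySem.List.pyGet? s.toList ((k : Nat) : Int) = some s.toList[k] := by
      rw [PySem.List.pyGet?_natCast]
      exact List.getElem?_eq_getElem (by omega)
    have hgt : (s.toList.take n.toNat)[k]'(by omega) = s.toList[k]'(by omega) := by
      exact List.getElem_take
    have hdrop : (s.toList.take n.toNat).drop k
        = (s.toList.take n.toNat)[k]'(by omega) :: (s.toList.take n.toNat).drop (k + 1) := by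
      exact (List.getElem_cons_drop _).symm
    have hKcons : pvK (n + 1) ((s.toList.take n.toNat).drop k) ((k : Nat) : Int)
        = (if (s.toList.take n.toNat)[k]'(by omega) = '|' then ((k : Nat) : Int)
            else (pvK (n + 1) ((s.toList.take n.toNat).drop (k + 1)) (((k : Nat) : Int) + 1)).headD (n + 1))
          :: pvK (n + 1) ((s.toList.take n.toNat).drop (k + 1)) (((k : Nat) : Int) + 1) := by
      rw [hdrop]; rfl
    have hcast1 : (((k : Nat) : Int) + 1) = ((k + 1 : Nat) : Int) := by push_cast; ring
    rw [hcast1] at hKcons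
    have hfold := hKcons
    rw [hgt] at hfold
    have hstep :
        (match PySem.List.pyGet? s.toList ((k : Nat) : Int) with
          | some c =>
            if c = '|' then
              (PySem.List.pySetD
                (List.replicate (k + 1) (n + 1) ++ pvK (n + 1) ((s.toList.take n.toNat).drop (k + 1)) ((k + 1 : Nat) : Int),
                  (pvK (n + 1) ((s.toList.take n.toNat).drop (k + 1)) ((k + 1 : Nat) : Int)).headD (n + 1)).1
                ((k : Nat) : Int) ((k : Nat) : Int), ((k : Nat) : Int))
            else
              (PySem.List.pySetD
                (List.replicate (k + 1) (n + 1) ++ pvK (n + 1) ((s.toList.take n.toNat).drop (k + 1)) ((k + 1 : Nat) : Int),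
                  (pvK (n + 1) ((s.toList.take n.toNat).drop (k + 1)) ((k + 1 : Nat) : Int)).headD (n + 1)).1
                ((k : Nat) : Int)
                (List.replicate (k + 1) (n + 1) ++ pvK (n + 1) ((s.toList.take n.toNat).drop (k + 1)) ((k + 1 : Nat) : Int),
                  (pvK (n + 1) ((s.toList.take n.toNat).drop (k + 1)) ((k + 1 : Nat) : Int)).headD (n + 1)).2,
                (List.replicate (k + 1) (n + 1) ++ pvK (n + 1) ((s.toList.take n.toNat).drop (k + 1)) ((k + 1 : Nat) : Int),
                  (pvK (n + 1) ((s.toList.take n.toNat).drop (k + 1)) ((k + 1 : Nat) : Int)).headD (n + 1)).2)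
          | none =>
            (List.replicate (k + 1) (n + 1) ++ pvK (n + 1) ((s.toList.take n.toNat).drop (k + 1)) ((k + 1 : Nat) : Int),
              (pvK (n + 1) ((s.toList.take n.toNat).drop (k + 1)) ((k + 1 : Nat) : Int)).headD (n + 1)))
        = (List.replicate k (n + 1) ++ pvK (n + 1) ((s.toList.take n.toNat).drop k) ((k : Nat) : Int),
            (pvK (n + 1) ((s.toList.take n.toNat).drop k) ((k : Nat) : Int)).headD (n + 1)) := by
      simp only [hget]
      by_cases hc : s.toList[k]'(by omega) = '|'
      · rw [if_pos hc]
        refine Prod.ext ?_ ?_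
        · show PySem.List.pySetD
            (List.replicate (k + 1) (n + 1) ++ pvK (n + 1) ((s.toList.take n.toNat).drop (k + 1)) ((k + 1 : Nat) : Int))
            ((k : Nat) : Int) ((k : Nat) : Int) = _
          rw [PySem.List.pySetD_natCast, set_replicate_append, hfold, if_pos hc]
        · show ((k : Nat) : Int) = _
          rw [hfold, if_pos hc]
          rfl
      · rw [if_neg hc]
        refine Prod.ext ?_ ?_
        · show PySem.List.pySetD
            (List.replicate (k + 1) (n + 1) ++ pvK (n + 1) ((s.toList.take n.toNat).drop (k + 1)) ((k + 1 : Nat) : Int))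
            ((k : Nat) : Int)
            ((pvK (n + 1) ((s.toList.take n.toNat).drop (k + 1)) ((k + 1 : Nat) : Int)).headD (n + 1)) = _
          rw [PySem.List.pySetD_natCast, set_replicate_append, hfold, if_neg hc]
        · show (pvK (n + 1) ((s.toList.take n.toNat).drop (k + 1)) ((k + 1 : Nat) : Int)).headD (n + 1) = _
          rw [hfold, if_neg hc]
          rfl
    rw [hstep]
    exact ih (by omega)

-- B-side invariant: out is the finished pvK of the prefix up to prev, the candles still to be
-- processed are exactly the candle positions ≥ i, and no candle lies in [prev, i)
theorem foldC_inv (s : String) (n : Int) (hn : 0 ≤ n) (hlen : n ≤ (s.toList.length : Int))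
    (i p : Nat) (hpi : p ≤ i) (hin : i ≤ n.toNat)
    (hp : p = 0 ∨ ((s.toList.take n.toNat).take p).getLast? = some '|')
    (hmid : '|' ∉ ((s.toList.take n.toNat).drop p).take (i - p)) :
    (((PySem.List.pyRange (i : Int) n 1).filter
        (fun j => PySem.List.pyGet? s.toList j == some '|')).foldl
      (fun (st : List Int × Int) c => (st.1 ++ List.replicate (c + 1 - st.2).toNat c, c + 1))
      (pvK (n + 1) ((s.toList.take n.toNat).take p) 0, (p : Int))).1
    ++ List.replicate
        (n - (((PySem.List.pyRange (i : Int) n 1).filter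
            (fun j => PySem.List.pyGet? s.toList j == some '|')).foldl
          (fun (st : List Int × Int) c => (st.1 ++ List.replicate (c + 1 - st.2).toNat c, c + 1))
          (pvK (n + 1) ((s.toList.take n.toNat).take p) 0, (p : Int))).2).toNat (n + 1)
    = pvK (n + 1) (s.toList.take n.toNat) 0 := by
  have htlen : (s.toList.take n.toNat).length = n.toNat := by
    rw [List.length_take]; omega
  obtain ⟨d, hd⟩ : ∃ d, n.toNat = i + d := ⟨n.toNat - i, by omega⟩
  clear hin
  induction d generalizing i p with
  | zero =>
    rw [PySem.List.pyRange_one_eq_nil (by omega)]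
    simp only [List.filter_nil, List.foldl_nil]
    have hfull : ((s.toList.take n.toNat).drop p).take (i - p) = (s.toList.take n.toNat).drop p := by
      apply List.take_of_length_le
      rw [List.length_drop, htlen]
      omega
    rw [hfull] at hmid
    have hlenp : ((s.toList.take n.toNat).take p).length = p := by
      rw [List.length_take]; omega
    have happ := pvK_append (n + 1) ((s.toList.take n.toNat).take p) ((s.toList.take n.toNat).drop p) 0
    rw [List.take_append_drop, hlenp] at happ
    rw [pvK_no_candle _ _ _ hmid, List.length_drop, htlen] at happ
    rw [headD_replicate] at happ
    rw [happ]
    congr 1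
    congr 1
    omega
  | succ d ih =>
    have hcons : PySem.List.pyRange ((i : Nat) : Int) n 1
        = ((i : Nat) : Int) :: PySem.List.pyRange (((i : Nat) : Int) + 1) n 1 :=
      PySem.List.pyRange_one_cons (by omega)
    have hget : PySem.List.pyGet? s.toList ((i : Nat) : Int) = some (s.toList[i]'(by omega)) := by
      rw [PySem.List.pyGet?_natCast]
      exact List.getElem?_eq_getElem (by omega)
    have hlenp : ((s.toList.take n.toNat).take p).length = p := by
      rw [List.length_take]; omega
    have hcast : (((i : Nat) : Int) + 1) = ((i + 1 : Nat) : Int) := by push_cast; ring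
    rw [hcons, List.filter_cons]
    by_cases hc : s.toList[i]'(by omega) = '|'
    · -- candle at i: emit the block [i] * (i + 1 - prev)
      have hP : ((fun j => PySem.List.pyGet? s.toList j == some '|') ((i : Nat) : Int)) = true := by
        simp [hget, hc]
      rw [if_pos hP, List.foldl_cons]
      have hmlen : (((s.toList.take n.toNat).drop p).take (i - p)).length = i - p := by
        rw [List.length_take, List.length_drop, htlen]; omega
      have hsplit : (s.toList.take n.toNat).take (i + 1)
          = (s.toList.take n.toNat).take p ++ ((((s.toList.take n.toNat).drop p).take (i - p)) ++ ['|']) := by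
        have h1 : (s.toList.take n.toNat).take (i + 1)
            = (s.toList.take n.toNat).take p ++ ((s.toList.take n.toNat).drop p).take (i + 1 - p) := by
          rw [← List.take_add]
          congr 1
          omega
        rw [h1]
        congr 1
        rw [show i + 1 - p = (i - p) + 1 by omega, List.take_succ]
        congr 1
        have hg : ((s.toList.take n.toNat).drop p)[i - p]? = some '|' := by
          rw [List.getElem?_drop, show p + (i - p) = i by omega]
          rw [List.getElem?_take_of_lt (by omega), List.getElem?_eq_getElem (by omega)]
          rw [hc]
        rw [hg]
        rfl
      have hseg := pvK_seg (n + 1) (((s.toList.take n.toNat).drop p).take (i - p)) ((p : Nat) : Int) hmid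
      rw [hmlen] at hseg
      rw [show ((p : Nat) : Int) + ((i - p : Nat) : Int) = ((i : Nat) : Int) by omega] at hseg
      have happ := pvK_append (n + 1) ((s.toList.take n.toNat).take p)
        ((((s.toList.take n.toNat).drop p).take (i - p)) ++ ['|']) 0
      rw [← hsplit, hlenp, show ((0 : Int) + (p : Int)) = (p : Int) by ring, hseg] at happ
      have hirr : pvK ((List.replicate (i - p + 1) ((i : Nat) : Int)).headD (n + 1))
            ((s.toList.take n.toNat).take p) 0 = pvK (n + 1) ((s.toList.take n.toNat).take p) 0 := by
        rcases hp with hp0 | hpl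
        · subst hp0
          rfl
        · exact pvK_base_irrel _ _ _ _ hpl
      rw [hirr] at happ
      -- happ : pvK (take (i+1)) 0 = pvK (take p) 0 ++ replicate (i-p+1) i
      have hstep :
          ((pvK (n + 1) ((s.toList.take n.toNat).take p) 0, ((p : Nat) : Int)).1
              ++ List.replicate ((((i : Nat) : Int) + 1 - (pvK (n + 1) ((s.toList.take n.toNat).take p) 0, ((p : Nat) : Int)).2).toNat) ((i : Nat) : Int),
            ((i : Nat) : Int) + 1)
          = (pvK (n + 1) ((s.toList.take n.toNat).take (i + 1)) 0, ((i + 1 : Nat) : Int)) := by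
        refine Prod.ext ?_ hcast
        show pvK (n + 1) ((s.toList.take n.toNat).take p) 0
            ++ List.replicate ((((i : Nat) : Int) + 1 - ((p : Nat) : Int)).toNat) ((i : Nat) : Int) = _
        rw [show (((i : Nat) : Int) + 1 - ((p : Nat) : Int)).toNat = i - p + 1 by omega, happ]
      rw [hstep]
      exact ih (i + 1) (i + 1) le_rfl
        (Or.inr (by rw [hsplit, ← List.append_assoc]; exact List.getLast?_concat))
        (by simp) (by omega)
    · -- no candle at i: filtered out, the candle-free gap grows
      rw [if_neg (fun h => hc (by rw [hget] at h; simpa using h))]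
      rw [hcast]
      refine ih (i + 1) p (by omega) hp ?_ (by omega)
      rw [show i + 1 - p = (i - p) + 1 by omega, List.take_succ]
      intro hmem
      rcases List.mem_append.mp hmem with hm | hm
      · exact hmid hm
      · rcases hopt : ((s.toList.take n.toNat).drop p)[i - p]? with _ | x
        · rw [hopt] at hm; simp at hm
        · rw [hopt] at hm
          simp at hm
          have : x = s.toList[i]'(by omega) := by
            rw [List.getElem?_drop, show p + (i - p) = i by omega] at hopt
            rw [List.getElem?_take_of_lt (by omega), List.getElem?_eq_getElem (by omega)] at hopt
            exact (Option.some.injEq ..).mp hopt.symm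
          rw [hm, this] at hc
          exact hc rfl

-- ===== VERDICT (by name: the statement is the Claim_ definition above) =====
theorem buildNearestRightCandle_spec : Claim_equal_buildNearestRightCandle := by
  intro s n _ hpre
  unfold Spec_buildNearestRightCandle buildNearestRightCandle buildNearestRightCandle_alt
  by_cases hn : n ≤ 0
  · rw [PySem.List.pyRange_neg_one_eq_nil (by omega), PySem.List.pyRange_one_eq_nil hn]
    simp only [List.filter_nil, List.foldl_nil]
    rw [show List.replicate n.toNat (n + 1) = ([] : List Int) by rw [show n.toNat = 0 by omega]; rfl]
    rw [show ((n : Int) - 0).toNat = 0 by omega]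
    rfl
  · have hn0 : (0 : Int) ≤ n := by omega
    have hlen : n ≤ (s.toList.length : Int) := hpre
    have hdrop : (s.toList.take n.toNat).drop n.toNat = [] := by
      rw [List.drop_eq_nil_iff]
      rw [List.length_take]; omega
    have hA := foldA_inv s n hn0 hlen n.toNat le_rfl
    rw [hdrop] at hA
    have hcast : ((n.toNat : Int)) - 1 = n - 1 := by omega
    rw [hcast] at hA
    simp only [pvK, List.append_nil, List.headD_nil] at hA
    rw [hA]
    have hB := foldC_inv s n hn0 hlen 0 0 le_rfl (by omega) (Or.inl rfl) (by simp)
    simp only [List.take_zero, pvK, Nat.cast_zero] at hB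
    exact hB.symm
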